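-- pv_equiv track=rewrite | github.com/DianaSuf/PythonTask | Module5/task8.py | find_cyclic_offset
-- ===== SOURCE A (Python) =====
-- def find_cyclic_offset(first_string, second_string):
--     if len(first_string) != len(second_string):
--         return "Первую строку нельзя получить из второй с помощью циклического сдвига."
--     for offset in range(len(first_string)):
--         offset_string = second_string[-offset:] + second_string[:-offset]
--         if offset_string == first_string:
--             return f"Первая строка получается из второй со сдвигом {offset}."
--     return "Первую строку нельзя получить из второй с помощью циклического сдвига."
-- ===== SOURCE B (Python) =====
-- def find_cyclic_offset(first_string, second_string):
--     n = len(first_string)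
--     if n != len(second_string):
--         return "Первую строку нельзя получить из второй с помощью циклического сдвига."
--     j = (second_string + second_string).rfind(first_string)
--     if j == -1:
--         return "Первую строку нельзя получить из второй с помощью циклического сдвига."
--     return f"Первая строка получается из второй со сдвигом {n - j}."
-- ===== Notes on version B (the rewrite author's own statement) =====
-- stated objective: faster
-- what changed: Replaces the O(n^2) loop that rebuilds and compares every rotation with a single rfind of first_string in second_string+second_string, mapping the highest occurrence index j to the smallest offset n-j.
-- intended difference: On the pair of empty strings A returns the 'cannot be obtained' message although every string is its own cyclic shift with offset 0 (range(0) is empty so A never tests offset 0), while B returns the offset-0 message, which is the intended value. — e.g. on find_cyclic_offset("", ""): A returns "Первую строку нельзя получить из второй с помощью циклического сдвига.", B returns "Первая строка получается из второй со сдвигом 0."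
import Mathlib
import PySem

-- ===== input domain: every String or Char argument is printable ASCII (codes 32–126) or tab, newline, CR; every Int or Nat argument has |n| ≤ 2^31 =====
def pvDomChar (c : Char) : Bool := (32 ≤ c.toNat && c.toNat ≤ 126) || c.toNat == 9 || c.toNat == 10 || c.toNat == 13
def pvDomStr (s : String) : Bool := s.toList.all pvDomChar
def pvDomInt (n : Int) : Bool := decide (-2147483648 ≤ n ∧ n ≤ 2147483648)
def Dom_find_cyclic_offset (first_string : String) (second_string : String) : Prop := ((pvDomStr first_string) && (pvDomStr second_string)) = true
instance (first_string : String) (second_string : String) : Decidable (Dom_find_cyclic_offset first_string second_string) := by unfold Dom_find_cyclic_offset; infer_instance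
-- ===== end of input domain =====

-- B replaces A's O(n^2) scan over all rotations by a single rfind of first_string in
-- second_string+second_string (highest occurrence j in [1,n] ↔ smallest offset n-j);
-- on the pair of empty strings A misses the trivial offset 0 and B reports it (see D_).

def pvMsgNo : String := "Первую строку нельзя получить из второй с помощью циклического сдвига."
def pvMsgYes (offset : Int) : String :=
  "Первая строка получается из второй со сдвигом " ++ PySem.Int.toStr offset ++ "."

-- ===== PORT A =====
-- the for-loop with early return, as structural recursion over the range list
def pvLoopA (first_string second_string : String) : List Int → String
  | [] => pvMsgNo
  | offset :: rest =>
    let offset_string := PySem.Str.slice second_string (some (-offset)) none ++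
                         PySem.Str.slice second_string none (some (-offset))
    if offset_string == first_string then pvMsgYes offset
    else pvLoopA first_string second_string rest

def find_cyclic_offset (first_string : String) (second_string : String) : String :=
  if PySem.Str.len first_string ≠ PySem.Str.len second_string then pvMsgNo
  else pvLoopA first_string second_string (PySem.List.pyRange 0 (PySem.Str.len first_string) 1)

-- ===== PORT B =====
def find_cyclic_offset_alt (first_string : String) (second_string : String) : String :=
  let n := PySem.Str.len first_string
  if n ≠ PySem.Str.len second_string then pvMsgNo
  else
    let j := PySem.Str.rfind (second_string ++ second_string) first_string
    if j == -1 then pvMsgNo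
    else pvMsgYes (n - j)

-- ===== PRECONDITION & SPEC =====
-- On the pair of empty strings A returns the "cannot be obtained" message although the empty
-- string is its own cyclic shift (range(0) is empty so A never tests offset 0), while B
-- returns the offset-0 message, which is the intended value.
def D_find_cyclic_offset (first_string : String) (second_string : String) : Prop :=
  first_string = "" ∧ second_string = ""
instance (first_string : String) (second_string : String) : Decidable (D_find_cyclic_offset first_string second_string) := by unfold D_find_cyclic_offset; infer_instance

def Spec_find_cyclic_offset (first_string : String) (second_string : String) (out : String) : Prop :=
  ¬ D_find_cyclic_offset first_string second_string → out = find_cyclic_offset_alt first_string second_string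
instance (first_string : String) (second_string : String) (out : String) : Decidable (Spec_find_cyclic_offset first_string second_string out) := by unfold Spec_find_cyclic_offset; infer_instance

def pvDiffWitness_find_cyclic_offset : String × String := ("", "")
def pvDiffWitnessOut_find_cyclic_offset : String × String :=
  ("Первую строку нельзя получить из второй с помощью циклического сдвига.",
   "Первая строка получается из второй со сдвигом 0.")

-- ===== CLAIM (what is proved, stated in full; the proofs are below) =====
def Claim_unchanged_find_cyclic_offset : Prop := ∀ (first_string : String) (second_string : String), Dom_find_cyclic_offset first_string second_string → Spec_find_cyclic_offset first_string second_string (find_cyclic_offset first_string second_string)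
def Claim_changed_find_cyclic_offset : Prop := Dom_find_cyclic_offset (pvDiffWitness_find_cyclic_offset.1) (pvDiffWitness_find_cyclic_offset.2) ∧ D_find_cyclic_offset (pvDiffWitness_find_cyclic_offset.1) (pvDiffWitness_find_cyclic_offset.2) ∧ find_cyclic_offset (pvDiffWitness_find_cyclic_offset.1) (pvDiffWitness_find_cyclic_offset.2) = pvDiffWitnessOut_find_cyclic_offset.1 ∧ find_cyclic_offset_alt (pvDiffWitness_find_cyclic_offset.1) (pvDiffWitness_find_cyclic_offset.2) = pvDiffWitnessOut_find_cyclic_offset.2 ∧ pvDiffWitnessOut_find_cyclic_offset.1 ≠ pvDiffWitnessOut_find_cyclic_offset.2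
def Claim_exact_find_cyclic_offset : Prop := ∀ (first_string : String) (second_string : String), Dom_find_cyclic_offset first_string second_string → D_find_cyclic_offset first_string second_string → find_cyclic_offset first_string second_string ≠ find_cyclic_offset_alt first_string second_string

-- ===== LEMMAS AND PROOFS =====

-- the loop's match condition at offset k, as a Bool
def pvCond (first_string second_string : String) (k : Int) : Bool :=
  (PySem.Str.slice second_string (some (-k)) none ++
   PySem.Str.slice second_string none (some (-k))) == first_string

-- spec of PySem.Chars.rfind.go: -1 and no occurrence ≤ j, or the highest occurrence ≤ j
theorem pv_rfind_go_spec (t sub : List Char) (j : Nat) :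
    (PySem.Chars.rfind.go t sub j = -1 ∧ ∀ i, i ≤ j → ¬ sub <+: t.drop i) ∨
    (∃ m, m ≤ j ∧ PySem.Chars.rfind.go t sub j = (m : Int) ∧ sub <+: t.drop m ∧
      ∀ i, m < i → i ≤ j → ¬ sub <+: t.drop i) := by
  induction j with
  | zero =>
    by_cases h : sub.isPrefixOf t
    · right
      exact ⟨0, le_refl 0, by simp [PySem.Chars.rfind.go, h], by
        simpa using List.isPrefixOf_iff_prefix.mp h, fun i h1 h2 => by omega⟩
    · left
      refine ⟨by simp [PySem.Chars.rfind.go, h], ?_⟩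
      intro i hi
      interval_cases i
      simpa using fun hp => h (List.isPrefixOf_iff_prefix.mpr (by simpa using hp))
  | succ j ih =>
    by_cases h : sub.isPrefixOf (t.drop (j + 1))
    · right
      refine ⟨j + 1, le_refl _, by simp [PySem.Chars.rfind.go, h], List.isPrefixOf_iff_prefix.mp h,
        fun i h1 h2 => by omega⟩
    · have hgo : PySem.Chars.rfind.go t sub (j + 1) = PySem.Chars.rfind.go t sub j := by
        simp [PySem.Chars.rfind.go, h]
      have hnp : ¬ sub <+: t.drop (j + 1) := fun hp => h (List.isPrefixOf_iff_prefix.mpr hp)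
      rcases ih with ⟨he, hall⟩ | ⟨m, hm, he, hp, hmax⟩
      · left
        refine ⟨hgo.trans he, fun i hi => ?_⟩
        rcases Nat.lt_or_ge i (j + 1) with h' | h'
        · exact hall i (by omega)
        · have : i = j + 1 := by omega
          subst this; exact hnp
      · right
        refine ⟨m, by omega, hgo.trans he, hp, fun i h1 h2 => ?_⟩
        rcases Nat.lt_or_ge i (j + 1) with h' | h'
        · exact hmax i h1 (by omega)
        · have : i = j + 1 := by omega
          subst this; exact hnp

-- spec of A's loop over pyRange a n 1: first matching offset, or no match
theorem pv_loopA_spec (f s : String) (a n : Nat) (ha : a ≤ n) :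
    ((∀ k, a ≤ k → k < n → pvCond f s (k : Int) = false) ∧
      pvLoopA f s (PySem.List.pyRange (a : Int) (n : Int) 1) = pvMsgNo) ∨
    (∃ k, a ≤ k ∧ k < n ∧ pvCond f s (k : Int) = true ∧
      (∀ i, a ≤ i → i < k → pvCond f s (i : Int) = false) ∧
      pvLoopA f s (PySem.List.pyRange (a : Int) (n : Int) 1) = pvMsgYes (k : Int)) := by
  induction hd : n - a generalizing a with
  | zero =>
    have : a = n := by omega
    subst this
    left
    constructor
    · intro k h1 h2; omega
    · have : PySem.List.pyRange (a : Int) (a : Int) 1 = [] := by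
        simp
      rw [this]; rfl
  | succ d ihd =>
    have hlt : a < n := by omega
    have hcons : PySem.List.pyRange (a : Int) (n : Int) 1 =
        (a : Int) :: PySem.List.pyRange ((a : Int) + 1) (n : Int) 1 := by
      exact PySem.List.pyRange_one_cons (by exact_mod_cast hlt)
    rw [hcons]
    by_cases hc : pvCond f s (a : Int) = true
    · right
      refine ⟨a, le_refl a, hlt, hc, fun i h1 h2 => by omega, ?_⟩
      simp only [pvLoopA]
      rw [if_pos (by simpa [pvCond] using hc)]
    · have hcf : pvCond f s (a : Int) = false := by simpa using hc
      have hloop : pvLoopA f s ((a : Int) :: PySem.List.pyRange ((a : Int) + 1) (n : Int) 1) =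
          pvLoopA f s (PySem.List.pyRange ((a : Int) + 1) (n : Int) 1) := by
        simp only [pvLoopA]
        rw [if_neg (by simpa [pvCond] using hc)]
      have hcast : ((a : Int) + 1) = ((a + 1 : Nat) : Int) := by push_cast; ring
      rw [hloop, hcast]
      rcases ihd (a + 1) (by omega) (by omega) with ⟨hall, he⟩ | ⟨k, h1, h2, h3, h4, h5⟩
      · left
        refine ⟨fun k hk1 hk2 => ?_, he⟩
        rcases Nat.lt_or_ge a k with h' | h'
        · exact hall k (by omega) hk2
        · have : k = a := by omega
          subst this; exact hcf
      · right
        refine ⟨k, by omega, h2, h3, fun i hi1 hi2 => ?_, h5⟩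
        rcases Nat.lt_or_ge a i with h' | h'
        · exact h4 i (by omega) hi2
        · have : i = a := by omega
          subst this; exact hcf

-- the loop condition at offset k < n is exactly an occurrence of f at index n-k of s++s
theorem pv_cond_iff (f s : String) (k : Nat)
    (hn : s.toList.length = f.toList.length) (hk : k < f.toList.length) :
    pvCond f s (k : Int) = true ↔ f.toList <+: (s.toList ++ s.toList).drop (f.toList.length - k) := by
  set n := f.toList.length with hnn
  have hdrop : (s.toList ++ s.toList).drop (n - k) = s.toList.drop (n - k) ++ s.toList := by
    rw [List.drop_append]
    have : n - k - s.toList.length = 0 := by omega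
    rw [this]; simp
  have hpre : (f.toList <+: (s.toList ++ s.toList).drop (n - k)) ↔
      f.toList = s.toList.drop (n - k) ++ s.toList.take (n - k) := by
    rw [List.prefix_iff_eq_take, hdrop, List.take_append]
    have hlen : (s.toList.drop (n - k)).length = k := by
      rw [List.length_drop]; omega
    have h1 : List.take n (s.toList.drop (n - k)) = s.toList.drop (n - k) :=
      List.take_of_length_le (by omega)
    rw [h1, hlen]
  have hslice : (PySem.Str.slice s (some (-(k : Int))) none ++
      PySem.Str.slice s none (some (-(k : Int)))).toList =
      s.toList.drop (n - k) ++ s.toList.take (n - k) := by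
    rcases Nat.eq_zero_or_pos k with hk0 | hkpos
    · subst hk0
      simp [String.toList_append, PySem.Str.toList_slice, PySem.Chars.slice_eq_listSlice,
        PySem.List.slice, PySem.List.clampIdx, hn]
    · rw [String.toList_append, PySem.Str.toList_slice, PySem.Str.toList_slice,
        PySem.Chars.slice_eq_listSlice, PySem.Chars.slice_eq_listSlice,
        PySem.List.slice_from_neg_natCast _ _ hkpos, PySem.List.slice_to_neg_natCast _ _ hkpos, hn]
  constructor
  · intro h
    have h2 : PySem.Str.slice s (some (-(k : Int))) none ++
        PySem.Str.slice s none (some (-(k : Int))) = f := by simpa [pvCond] using h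
    rw [← String.toList_inj, hslice] at h2
    rw [hpre]
    exact h2.symm
  · intro h
    have h' := hpre.mp h
    simp only [pvCond]
    rw [beq_iff_eq, ← String.toList_inj, hslice]
    exact h'.symm

theorem pv_occ_le (f s : String) (i : Nat)
    (hn : s.toList.length = f.toList.length) (hpos : f.toList.length ≠ 0)
    (h : f.toList <+: (s.toList ++ s.toList).drop i) : i ≤ f.toList.length := by
  have := h.length_le
  rw [List.length_drop, List.length_append, hn] at this
  omega

theorem pv_occ_zero (f s : String)
    (hn : s.toList.length = f.toList.length)
    (h : f.toList <+: (s.toList ++ s.toList)) :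
    f.toList <+: (s.toList ++ s.toList).drop f.toList.length := by
  have hfs : f.toList = s.toList := by
    have h1 := List.prefix_iff_eq_take.mp h
    rwa [List.take_left' hn] at h1
  have h2 : (s.toList ++ s.toList).drop f.toList.length = s.toList := by
    rw [← hn, List.drop_left]
  rw [h2, hfs]

-- ===== VERDICT (by name: the statement is the Claim_ definition above) =====
theorem find_cyclic_offset_spec : Claim_unchanged_find_cyclic_offset := by
  intro f s _ hD
  unfold find_cyclic_offset find_cyclic_offset_alt
  by_cases hlen : PySem.Str.len f = PySem.Str.len s
  case neg => rw [if_pos hlen, if_pos hlen]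
  rw [if_neg (by simpa using hlen), if_neg (by simpa using hlen)]
  have hn : s.toList.length = f.toList.length := by
    rw [PySem.Str.len_eq, PySem.Str.len_eq] at hlen
    exact_mod_cast hlen.symm
  set n := f.toList.length with hnn
  have hne : n ≠ 0 := by
    intro h0
    apply hD
    constructor
    · rw [← String.toList_inj]
      have : f.toList.length = 0 := h0
      simpa using List.length_eq_zero_iff.mp this
    · rw [← String.toList_inj]
      have : s.toList.length = 0 := by omega
      simpa using List.length_eq_zero_iff.mp this
  have hrw : PySem.Str.rfind (s ++ s) f =
      PySem.Chars.rfind.go (s.toList ++ s.toList) f.toList (s.toList ++ s.toList).length := by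
    rw [PySem.Str.rfind_eq, String.toList_append]; rfl
  have hlen2 : (s.toList ++ s.toList).length = 2 * n := by
    rw [List.length_append, hn]; omega
  have hlenf : PySem.Str.len f = (n : Int) := by rw [PySem.Str.len_eq]
  have hrange : PySem.List.pyRange 0 (PySem.Str.len f) 1 =
      PySem.List.pyRange ((0 : Nat) : Int) ((n : Nat) : Int) 1 := by
    rw [hlenf]; norm_num
  rw [hrange]
  rcases pv_rfind_go_spec (s.toList ++ s.toList) f.toList ((s.toList ++ s.toList).length) with
    ⟨he, hall⟩ | ⟨m, hm, he, hp, hmax⟩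
  · -- no occurrence anywhere: both return pvMsgNo
    rw [hrw] at *
    rw [he]
    rw [if_pos (by rfl)]
    rcases pv_loopA_spec f s 0 n (by omega) with ⟨_, he2⟩ | ⟨k, _, hk2, hk3, _, _⟩
    · exact he2
    · exfalso
      have hocc := (pv_cond_iff f s k hn hk2).mp hk3
      exact hall (n - k) (by omega) hocc
  · -- highest occurrence m: A finds the first offset n-m, B returns n-m
    rw [hrw] at *
    have hm_le : m ≤ n := pv_occ_le f s m hn hne hp
    have hm_pos : 1 ≤ m := by
      by_contra h0
      have hm0 : m = 0 := by omega
      subst hm0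
      have hoccn := pv_occ_zero f s hn (by simpa using hp)
      exact hmax n (by omega) (by omega) hoccn
    rw [he]
    rw [if_neg (by simp)]
    rcases pv_loopA_spec f s 0 n (by omega) with ⟨hall2, _⟩ | ⟨k, _, hk2, hk3, hk4, hk5⟩
    · exfalso
      have hc : pvCond f s ((n - m : Nat) : Int) = true := by
        rw [pv_cond_iff f s (n - m) hn (by omega)]
        have : n - (n - m) = m := by omega
        rw [this]; exact hp
      have := hall2 (n - m) (by omega) (by omega)
      rw [hc] at this; exact absurd this (by simp)
    · rw [hk5]
      have hkeq : k = n - m := by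
        rcases Nat.lt_trichotomy k (n - m) with h' | h' | h'
        · exfalso
          have hocc := (pv_cond_iff f s k hn hk2).mp hk3
          exact hmax (n - k) (by omega) (by omega) hocc
        · exact h'
        · exfalso
          have hc : pvCond f s ((n - m : Nat) : Int) = true := by
            rw [pv_cond_iff f s (n - m) hn (by omega)]
            have : n - (n - m) = m := by omega
            rw [this]; exact hp
          have := hk4 (n - m) (by omega) h'
          rw [hc] at this; exact absurd this (by simp)
      subst hkeq
      congr 1
      rw [hlenf]
      push_cast [Nat.cast_sub hm_le]
      ring

set_option maxRecDepth 10000 in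
theorem find_cyclic_offset_changed : Claim_changed_find_cyclic_offset := by
  unfold Claim_changed_find_cyclic_offset; decide

set_option maxRecDepth 10000 in
theorem find_cyclic_offset_tight : Claim_exact_find_cyclic_offset := by
  intro f s _ hD
  obtain ⟨h1, h2⟩ := hD
  subst h1; subst h2
  decide
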